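-- pv_equiv track=rewrite | github.com/pypi-data/pypi-mirror-404 | packages/ArWikiCats/arwikicats-0.1.0b6.tar.gz/arwikicats-0.1.0b6/ArWikiCats/legacy_bots/resolvers/country_resolver.py | _validate_separators
-- ===== SOURCE A (Python) =====
-- def _validate_separators(country: str) -> bool:
--     """
--     Return whether the input contains any disallowed separator phrases.
--
--     Checks for presence of common separator words/phrases (for example " in ", " of ", or the special "-of ")
--     and returns True only when none are found.
--
--     Returns:
--         True if no disallowed separators are present, False otherwise.
--     """
--     separators = [
--         "based in",
--         "in",
--         "by",
--         "about",
--         "to",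
--         "of",
--         "-of ",  # special case
--         "from",
--         "at",
--         "on",
--     ]
--     separators = [f" {sep} " if sep != "-of " else sep for sep in separators]
--     for sep in separators:
--         if sep in country:
--             return False
--     return True
-- ===== SOURCE B (Python) =====
-- def _validate_separators(country: str) -> bool:
--     # One left-to-right scan over positions instead of ten independent substring
--     # searches; "based in" is dropped as redundant (" based in " contains " in ").
--     words = ("in", "by", "about", "to", "of", "from", "at", "on")
--     for j in range(len(country)):
--         if country.startswith("-of ", j):
--             return False
--         if country[j] == " " and any(country.startswith(w + " ", j + 1) for w in words):
--             return False
--     return True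
-- ===== Notes on version B (the rewrite author's own statement) =====
-- stated objective: alternative
-- what changed: Replaces ten independent substring scans ('sep in country') with a single left-to-right scan over positions that checks startswith at each offset, and drops the redundant 'based in' token (any ' based in ' hit is already an ' in ' hit).
import Mathlib
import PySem

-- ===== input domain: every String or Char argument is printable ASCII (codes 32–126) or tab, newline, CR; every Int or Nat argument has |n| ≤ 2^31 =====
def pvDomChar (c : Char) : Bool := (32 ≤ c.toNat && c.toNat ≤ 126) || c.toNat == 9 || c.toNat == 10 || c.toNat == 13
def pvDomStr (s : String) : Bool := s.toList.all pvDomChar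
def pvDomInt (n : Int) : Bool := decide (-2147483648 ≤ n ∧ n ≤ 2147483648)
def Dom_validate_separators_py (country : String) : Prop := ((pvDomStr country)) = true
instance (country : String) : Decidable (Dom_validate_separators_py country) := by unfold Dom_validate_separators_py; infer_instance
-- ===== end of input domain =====

-- B replaces A's ten independent substring scans with one left-to-right scan over
-- positions (startswith checks at each offset), dropping the redundant "based in" token.

-- ===== PORT A =====
-- 'for sep in separators: if sep in country: return False' as structural recursion
def pvALoop (country : String) : List String → Bool
  | [] => true
  | sep :: rest => if PySem.Str.isIn sep country then false else pvALoop country rest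

def validate_separators_py (country : String) : Bool :=
  let separators : List String :=
    ["based in", "in", "by", "about", "to", "of", "-of ", "from", "at", "on"]
  let separators := separators.map (fun sep => if sep ≠ "-of " then " " ++ sep ++ " " else sep)
  pvALoop country separators

-- ===== PORT B =====
-- 'for j in range(len(country)): …' ported as recursion over the suffixes of the
-- character list (the suffix starting at j plays the role of country[j:]).
def pvBScan (words : List (List Char)) : List Char → Bool
  | [] => true
  | c :: rest =>
    if PySem.Chars.startswith (c :: rest) "-of ".toList then false
    else if c = ' ' ∧ words.any (fun w => PySem.Chars.startswith rest (w ++ [' '])) then false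
    else pvBScan words rest

def validate_separators_py_alt (country : String) : Bool :=
  let words : List (List Char) :=
    (["in", "by", "about", "to", "of", "from", "at", "on"] : List String).map String.toList
  pvBScan words country.toList

-- ===== PRECONDITION & SPEC =====
def Spec_validate_separators_py (country : String) (out : Bool) : Prop := out = validate_separators_py_alt country
instance (country : String) (out : Bool) : Decidable (Spec_validate_separators_py country out) := by unfold Spec_validate_separators_py; infer_instance

-- ===== CLAIM (what is proved, stated in full; the proofs are below) =====
def Claim_equal_validate_separators_py : Prop := ∀ (country : String), Dom_validate_separators_py country → Spec_validate_separators_py country (validate_separators_py country)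

-- ===== LEMMAS AND PROOFS =====

theorem pvALoop_true_iff (country : String) (l : List String) :
    pvALoop country l = true ↔ ∀ sep ∈ l, ¬ sep.toList <:+: country.toList := by
  induction l with
  | nil => simp [pvALoop]
  | cons s rest ih =>
    simp only [pvALoop]
    rw [List.forall_mem_cons]
    by_cases h : PySem.Str.isIn s country = true
    · have hinf : s.toList <:+: country.toList := (PySem.Str.isIn_iff_infix s country).mp h
      rw [if_pos h]
      simp [hinf]
    · have hn : ¬ s.toList <:+: country.toList :=
        fun hc => h ((PySem.Str.isIn_iff_infix s country).mpr hc)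
      rw [if_neg h, ih]
      simp [hn]

theorem pvBScan_true_iff (words : List (List Char)) (cs : List Char) :
    pvBScan words cs = true ↔
      ∀ t, t <:+ cs → ¬ ("-of ".toList <+: t) ∧ ∀ w ∈ words, ¬ ((' ' :: (w ++ [' '])) <+: t) := by
  induction cs with
  | nil =>
    simp only [pvBScan, true_iff]
    intro t ht
    rw [List.suffix_nil] at ht
    subst ht
    constructor
    · intro h; exact absurd (List.prefix_nil.mp h) (by decide)
    · intro w _ h; simpa using List.prefix_nil.mp h
  | cons c rest ih =>
    rw [pvBScan]
    by_cases h1 : PySem.Chars.startswith (c :: rest) "-of ".toList = true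
    · have hpre : "-of ".toList <+: c :: rest := (PySem.Chars.startswith_iff _ _).mp h1
      rw [if_pos h1]
      simp only [Bool.false_eq_true, false_iff, not_forall]
      exact ⟨c :: rest, List.suffix_refl _, fun hc => hc.1 hpre⟩
    · have hno : ¬ "-of ".toList <+: c :: rest :=
        fun hc => h1 ((PySem.Chars.startswith_iff _ _).mpr hc)
      rw [if_neg h1]
      by_cases h2 : c = ' ' ∧ words.any (fun w => PySem.Chars.startswith rest (w ++ [' '])) = true
      · obtain ⟨hc, hw⟩ := h2
        subst hc
        obtain ⟨w, hwmem, hwpre⟩ := List.any_eq_true.mp hw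
        have hp : (' ' :: (w ++ [' '])) <+: (' ' :: rest) :=
          List.cons_prefix_cons.mpr ⟨rfl, (PySem.Chars.startswith_iff _ _).mp hwpre⟩
        rw [if_pos ⟨rfl, hw⟩]
        simp only [Bool.false_eq_true, false_iff, not_forall]
        exact ⟨' ' :: rest, List.suffix_refl _, fun hc => hc.2 w hwmem hp⟩
      · rw [if_neg h2, ih]
        constructor
        · intro hall t ht
          rcases List.suffix_cons_iff.mp ht with h | h
          · subst h
            refine ⟨hno, ?_⟩
            intro w hwmem hp
            rcases List.cons_prefix_cons.mp hp with ⟨hceq, hpre⟩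
            exact h2 ⟨hceq.symm,
              List.any_eq_true.mpr ⟨w, hwmem, (PySem.Chars.startswith_iff _ _).mpr hpre⟩⟩
          · exact hall t h
        · intro hall t ht
          exact hall t (List.suffix_cons_iff.mpr (Or.inr ht))

theorem pv_infix_iff (sub cs : List Char) :
    sub <:+: cs ↔ ∃ t, t <:+ cs ∧ sub <+: t := by
  constructor
  · intro h
    obtain ⟨t, hpre, hsuf⟩ := List.infix_iff_prefix_suffix.mp h
    exact ⟨t, hsuf, hpre⟩
  · rintro ⟨t, hsuf, hpre⟩
    exact List.infix_iff_prefix_suffix.mpr ⟨t, hpre, hsuf⟩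

-- ===== VERDICT (by name: the statement is the Claim_ definition above) =====
theorem validate_separators_py_spec : Claim_equal_validate_separators_py := by
  intro country _
  unfold Spec_validate_separators_py
  rw [Bool.eq_iff_iff]
  unfold validate_separators_py validate_separators_py_alt
  simp only [List.map]
  rw [pvALoop_true_iff, pvBScan_true_iff]
  constructor
  · -- A-condition implies B-condition
    intro hA t ht
    constructor
    · intro hp
      refine hA "-of " (by decide) ?_
      exact (pv_infix_iff _ _).mpr ⟨t, ht, hp⟩
    · intro w hw hp
      have hinf : (' ' :: (w ++ [' '])) <:+: country.toList := (pv_infix_iff _ _).mpr ⟨t, ht, hp⟩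
      fin_cases hw
      · exact hA " in " (by decide) (by exact hinf)
      · exact hA " by " (by decide) (by exact hinf)
      · exact hA " about " (by decide) (by exact hinf)
      · exact hA " to " (by decide) (by exact hinf)
      · exact hA " of " (by decide) (by exact hinf)
      · exact hA " from " (by decide) (by exact hinf)
      · exact hA " at " (by decide) (by exact hinf)
      · exact hA " on " (by decide) (by exact hinf)
  · -- B-condition implies A-condition
    intro hB sep hsep hinf
    have hnot : ∀ sub : List Char, sub <:+: country.toList →
        ("-of ".toList = sub → False) ∧
        ∀ w ∈ (["in", "by", "about", "to", "of", "from", "at", "on"] : List String).map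
            String.toList, (' ' :: (w ++ [' '])) = sub → False := by
      intro sub hsub
      obtain ⟨t, ht, hp⟩ := (pv_infix_iff _ _).mp hsub
      exact ⟨fun he => (hB t ht).1 (he ▸ hp), fun w hw he => (hB t ht).2 w hw (he ▸ hp)⟩
    fin_cases hsep
    · -- " based in " contains " in "
      have hin : (' ' :: ("in".toList ++ [' '])) <:+: country.toList :=
        List.IsInfix.trans (by decide) hinf
      exact (hnot _ hin).2 "in".toList (by decide) rfl
    · exact (hnot _ hinf).2 "in".toList (by decide) (by decide)
    · exact (hnot _ hinf).2 "by".toList (by decide) (by decide)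
    · exact (hnot _ hinf).2 "about".toList (by decide) (by decide)
    · exact (hnot _ hinf).2 "to".toList (by decide) (by decide)
    · exact (hnot _ hinf).2 "of".toList (by decide) (by decide)
    · exact (hnot _ hinf).1 (by decide)
    · exact (hnot _ hinf).2 "from".toList (by decide) (by decide)
    · exact (hnot _ hinf).2 "at".toList (by decide) (by decide)
    · exact (hnot _ hinf).2 "on".toList (by decide) (by decide)
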